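-- pv_equiv track=rewrite | github.com/faaz-world/autosnakes | functions.py | is_othersnake_collision_down
-- ===== SOURCE A (Python) =====
-- def is_othersnake_collision_down(mysnake, othersnake, dis_width):
--     my_x_pos = int(mysnake[0][0])
--     my_y_pos = int(mysnake[0][1])
--     while my_y_pos < dis_width:
--         for block in othersnake[1:]:
--             if block[1] == my_y_pos and block[0] == my_x_pos:
--                 return True
--         my_y_pos += 1
--     return False
-- ===== SOURCE B (Python) =====
-- def is_othersnake_collision_down(mysnake, othersnake, dis_width):
--     my_x_pos = int(mysnake[0][0])
--     my_y_pos = int(mysnake[0][1])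
--     return any(b[0] == my_x_pos and my_y_pos <= b[1] < dis_width
--                for b in othersnake[1:])
-- ===== Notes on version B (the rewrite author's own statement) =====
-- stated objective: simpler
-- what changed: Replaces A's while-loop over every y from my_y_pos up to dis_width (each pass rescanning othersnake) with one single scan of othersnake testing x equality and my_y_pos <= b[1] < dis_width.
-- outside the precondition, e.g. on is_othersnake_collision_down([[3, 5]], [[0, 0], [3]], 1): A returns False, B raises IndexError
import Mathlib
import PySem

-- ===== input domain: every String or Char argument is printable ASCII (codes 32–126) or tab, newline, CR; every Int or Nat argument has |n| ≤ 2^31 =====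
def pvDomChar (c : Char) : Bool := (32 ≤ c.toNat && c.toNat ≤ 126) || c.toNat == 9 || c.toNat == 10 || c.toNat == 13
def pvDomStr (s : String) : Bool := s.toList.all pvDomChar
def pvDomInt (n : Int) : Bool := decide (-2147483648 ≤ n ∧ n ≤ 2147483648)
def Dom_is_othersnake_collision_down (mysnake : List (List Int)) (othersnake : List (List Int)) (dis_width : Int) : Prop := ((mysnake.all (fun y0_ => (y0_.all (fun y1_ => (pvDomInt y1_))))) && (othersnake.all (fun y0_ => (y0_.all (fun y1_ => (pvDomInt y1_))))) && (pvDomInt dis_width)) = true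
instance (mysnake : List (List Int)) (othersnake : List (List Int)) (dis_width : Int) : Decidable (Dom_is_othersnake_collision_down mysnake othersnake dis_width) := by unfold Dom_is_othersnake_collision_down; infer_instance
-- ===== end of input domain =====

-- B replaces A's while-loop over every y in [my_y_pos, dis_width) (each pass rescanning
-- othersnake) by ONE scan of othersnake testing b[0] == x and my_y_pos <= b[1] < dis_width.

-- ===== PORT A =====
-- inner 'for block in othersnake[1:]' with early 'return True'
def pvInnerA (x y : Int) (os : List (List Int)) : Bool :=
  os.any (fun b =>
    PySem.List.pyGet? b 1 == some y && PySem.List.pyGet? b 0 == some x)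

-- the 'while my_y_pos < dis_width' loop; terminates since my_y_pos increases to dis_width
def pvLoopA (x : Int) (os : List (List Int)) (y w : Int) : Bool :=
  if y < w then
    if pvInnerA x y os then true else pvLoopA x os (y + 1) w
  else false
termination_by (w - y).toNat
decreasing_by omega

def is_othersnake_collision_down (mysnake : List (List Int)) (othersnake : List (List Int)) (dis_width : Int) : Bool :=
  -- mysnake[0][0] / mysnake[0][1]; none = IndexError, excluded by Pre_
  match PySem.List.pyGet? mysnake 0 with
  | none => false
  | some h =>
    match PySem.List.pyGet? h 0, PySem.List.pyGet? h 1 with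
    | some x, some y => pvLoopA x (othersnake.drop 1) y dis_width  -- othersnake[1:]
    | _, _ => false

-- ===== PORT B =====
-- my_x_pos / my_y_pos of B; none = IndexError (outside Pre_)
def pvHeadXY (mysnake : List (List Int)) : Option (Int × Int) := do
  let h ← PySem.List.pyGet? mysnake 0
  let x ← PySem.List.pyGet? h 0
  let y ← PySem.List.pyGet? h 1
  return (x, y)

def is_othersnake_collision_down_alt (mysnake : List (List Int)) (othersnake : List (List Int)) (dis_width : Int) : Bool :=
  match pvHeadXY mysnake with
  | some (x, y) =>
      (othersnake.drop 1).any (fun b =>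
        PySem.List.pyGet? b 0 == some x &&
        ((PySem.List.pyGet? b 1).elim false (fun b1 =>
          decide (y ≤ b1) && decide (b1 < dis_width))))
  | none => false

-- ===== PRECONDITION & SPEC =====
-- Pre_ excludes the inputs on which Python A raises IndexError (mysnake empty or its head
-- shorter than 2), and additionally all inputs whose othersnake tail contains a row shorter
-- than 2: A raises IndexError on such rows whenever its scan runs, and where the scan is
-- vacuous (my_y_pos ≥ dis_width, or an earlier row already matched) A's value is reached only
-- by skipping malformed data that B's single scan must read (B itself raises on some of them).
def Pre_is_othersnake_collision_down (mysnake : List (List Int)) (othersnake : List (List Int)) (dis_width : Int) : Prop :=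
  mysnake ≠ [] ∧ (∀ h ∈ mysnake.take 1, 2 ≤ h.length) ∧
  (∀ b ∈ othersnake.drop 1, 2 ≤ b.length)
instance (mysnake : List (List Int)) (othersnake : List (List Int)) (dis_width : Int) : Decidable (Pre_is_othersnake_collision_down mysnake othersnake dis_width) := by unfold Pre_is_othersnake_collision_down; infer_instance

def pvWitness_is_othersnake_collision_down : List (List Int) × List (List Int) × Int :=
  ([[3, 1]], [[0, 0], [3, 2]], 5)

def Spec_is_othersnake_collision_down (mysnake : List (List Int)) (othersnake : List (List Int)) (dis_width : Int) (out : Bool) : Prop := out = is_othersnake_collision_down_alt mysnake othersnake dis_width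
instance (mysnake : List (List Int)) (othersnake : List (List Int)) (dis_width : Int) (out : Bool) : Decidable (Spec_is_othersnake_collision_down mysnake othersnake dis_width out) := by unfold Spec_is_othersnake_collision_down; infer_instance

-- ===== CLAIM (what is proved, stated in full; the proofs are below) =====
def Claim_equal_is_othersnake_collision_down : Prop := ∀ (mysnake : List (List Int)) (othersnake : List (List Int)) (dis_width : Int), Dom_is_othersnake_collision_down mysnake othersnake dis_width → Pre_is_othersnake_collision_down mysnake othersnake dis_width → Spec_is_othersnake_collision_down mysnake othersnake dis_width (is_othersnake_collision_down mysnake othersnake dis_width)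

-- ===== LEMMAS AND PROOFS =====

-- A's while-loop returns true iff some row matches x and has y-coordinate in [y, w)
lemma pvLoopA_eq_true_iff (x : Int) (os : List (List Int)) :
    ∀ (n : Nat) (y w : Int), (w - y).toNat = n →
      (pvLoopA x os y w = true ↔
        ∃ b ∈ os, PySem.List.pyGet? b 0 = some x ∧
          ∃ b1, PySem.List.pyGet? b 1 = some b1 ∧ y ≤ b1 ∧ b1 < w) := by
  intro n
  induction n with
  | zero =>
    intro y w hn
    have hyw : ¬ y < w := by omega
    rw [pvLoopA, if_neg hyw]
    simp only [Bool.false_eq_true, false_iff]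
    rintro ⟨b, _, _, b1, _, hy, hw⟩
    omega
  | succ n ih =>
    intro y w hn
    have hyw : y < w := by omega
    rw [pvLoopA, if_pos hyw]
    have hrec := ih (y + 1) w (by omega)
    by_cases hin : pvInnerA x y os = true
    · simp only [hin, if_pos, true_iff]
      obtain ⟨b, hb, hmatch⟩ := List.any_eq_true.mp hin
      simp only [Bool.and_eq_true, beq_iff_eq] at hmatch
      exact ⟨b, hb, hmatch.2, y, hmatch.1, le_refl y, hyw⟩
    · simp only [hin, if_neg, Bool.false_eq_true, not_false_eq_true, hrec]
      constructor
      · rintro ⟨b, hb, hx, b1, hb1, hy1, hw1⟩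
        exact ⟨b, hb, hx, b1, hb1, by omega, hw1⟩
      · rintro ⟨b, hb, hx, b1, hb1, hy1, hw1⟩
        refine ⟨b, hb, hx, b1, hb1, ?_, hw1⟩
        by_cases h : y + 1 ≤ b1
        · omega
        · exfalso
          have hb1y : b1 = y := by omega
          subst hb1y
          exact hin (List.any_eq_true.mpr ⟨b, hb, by
            simp only [Bool.and_eq_true, beq_iff_eq]; exact ⟨hb1, hx⟩⟩)

-- B's single scan computes the same existential
lemma pvAltScan_eq_true_iff (x y w : Int) (os : List (List Int)) :
    (os.any (fun b =>
        PySem.List.pyGet? b 0 == some x &&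
        ((PySem.List.pyGet? b 1).elim false (fun b1 =>
          decide (y ≤ b1) && decide (b1 < w)))) = true) ↔
      ∃ b ∈ os, PySem.List.pyGet? b 0 = some x ∧
        ∃ b1, PySem.List.pyGet? b 1 = some b1 ∧ y ≤ b1 ∧ b1 < w := by
  rw [List.any_eq_true]
  constructor
  · rintro ⟨b, hb, hp⟩
    refine ⟨b, hb, ?_⟩
    cases hb1 : PySem.List.pyGet? b 1 with
    | none => rw [hb1] at hp; simp at hp
    | some b1 =>
      rw [hb1] at hp
      simp only [Bool.and_eq_true, beq_iff_eq, Option.elim_some, decide_eq_true_eq] at hp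
      exact ⟨hp.1, b1, rfl, hp.2.1, hp.2.2⟩
  · rintro ⟨b, hb, hx, b1, hb1, hy1, hw1⟩
    exact ⟨b, hb, by simp [hx, hb1, hy1, hw1]⟩

lemma ports_agree (mysnake othersnake : List (List Int)) (dis_width : Int) :
    is_othersnake_collision_down mysnake othersnake dis_width =
      is_othersnake_collision_down_alt mysnake othersnake dis_width := by
  unfold is_othersnake_collision_down is_othersnake_collision_down_alt pvHeadXY
  cases PySem.List.pyGet? mysnake 0 with
  | none => rfl
  | some h =>
    simp only [Option.bind_eq_bind, Option.bind_some]
    cases hx : PySem.List.pyGet? h 0 with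
    | none => cases PySem.List.pyGet? h 1 <;> rfl
    | some x =>
      simp only [Option.bind_some]
      cases hy : PySem.List.pyGet? h 1 with
      | none => rfl
      | some y =>
        have hA := pvLoopA_eq_true_iff x (othersnake.drop 1) (dis_width - y).toNat y dis_width rfl
        have hB := pvAltScan_eq_true_iff x y dis_width (othersnake.drop 1)
        simp only [Option.bind_some]
        apply Bool.eq_iff_iff.mpr
        rw [hA, hB]

-- ===== VERDICT (by name: the statement is the Claim_ definition above) =====
theorem is_othersnake_collision_down_spec : Claim_equal_is_othersnake_collision_down := by
  intro mysnake othersnake dis_width _ _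
  exact ports_agree mysnake othersnake dis_width
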